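-- pv_equiv track=rewrite | github.com/steven-terrana/advent-of-code | 2018/05/part_1.py | fully_react_polymer
-- ===== SOURCE A (Python) =====
-- def fully_react_polymer(polymer: str) -> int:
--     stack = []
--     for unit in polymer:
--         if stack and stack[-1] != unit and stack[-1].lower() == unit.lower():
--             stack.pop()  # They react, so remove the previous unit
--         else:
--             stack.append(unit)  # No reaction, so add the unit to the stack
--
--     return len(stack)
-- ===== SOURCE B (Python) =====
-- def fully_react_polymer(polymer: str) -> int:
--     # Divide and conquer: fully react each half, then cancel reacting
--     # pairs across the boundary of the two reacted halves.
--     def react(units):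
--         n = len(units)
--         if n <= 1:
--             return units
--         left = react(units[:n // 2])
--         right = react(units[n // 2:])
--         i, j = len(left), 0
--         while i > 0 and j < len(right) and left[i - 1] != right[j] \
--                 and left[i - 1].lower() == right[j].lower():
--             i -= 1
--             j += 1
--         return left[:i] + right[j:]
--     return len(react(list(polymer)))
-- ===== Notes on version B (the rewrite author's own statement) =====
-- stated objective: alternative
-- what changed: Replaced A's single left-to-right stack pass with a divide-and-conquer algorithm: recursively react each half of the string, then cancel reacting pairs across the boundary of the two reduced halves.
import Mathlib
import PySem

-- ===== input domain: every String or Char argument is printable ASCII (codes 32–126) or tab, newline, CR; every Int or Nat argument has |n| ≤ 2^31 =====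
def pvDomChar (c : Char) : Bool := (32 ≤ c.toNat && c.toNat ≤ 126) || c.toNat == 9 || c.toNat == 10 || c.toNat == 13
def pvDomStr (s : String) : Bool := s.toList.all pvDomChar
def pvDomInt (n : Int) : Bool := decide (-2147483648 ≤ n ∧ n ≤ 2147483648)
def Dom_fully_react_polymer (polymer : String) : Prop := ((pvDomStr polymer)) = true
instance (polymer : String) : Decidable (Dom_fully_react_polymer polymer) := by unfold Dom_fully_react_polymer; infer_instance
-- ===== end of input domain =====

-- B replaces A's single left-to-right stack pass by a divide-and-conquer reaction
-- (react each half recursively, then cancel reacting pairs across the boundary);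
-- objective: alternative algorithm, same exact result, proved for all strings.

-- the reaction test both Pythons write inline: x != y and x.lower() == y.lower()
def pvReacts (x y : Char) : Bool :=
  x ≠ y && (PySem.Chars.lowerChar x == PySem.Chars.lowerChar y)

-- ===== PORT A =====
-- one iteration of A's for-loop body (stack[-1] = getLast?, pop = dropLast, append = ++ [u])
def pvStepA (stack : List Char) (unit : Char) : List Char :=
  match stack.getLast? with
  | some t => if pvReacts t unit then stack.dropLast else stack ++ [unit]
  | none => stack ++ [unit]

def fully_react_polymer (polymer : String) : Int :=
  ((polymer.toList.foldl pvStepA []).length : Int)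

-- ===== PORT B =====
-- Source B's boundary-cancelling while loop: left[-1] = getLast?, right[0] = head?;
-- the two index pointers i, j become dropLast/tail, and left[:i] + right[j:] is the final ++
def pvMerge (a b : List Char) : List Char :=
  match ha : a.getLast?, b.head? with
  | some t, some u =>
    if pvReacts t u then pvMerge a.dropLast b.tail else a ++ b
  | some _, none => a ++ b
  | none, _ => a ++ b
termination_by a.length
decreasing_by
  have hne : a ≠ [] := by intro h; subst h; simp at ha
  have := List.length_pos_of_ne_nil hne
  simp [List.length_dropLast]; omega

-- Source B's recursive react; the slices units[:n//2] / units[n//2:] have a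
-- non-negative in-range bound, where Python slicing is exactly take/drop
def pvReact (units : List Char) : List Char :=
  if units.length ≤ 1 then units
  else pvMerge (pvReact (units.take (units.length / 2)))
               (pvReact (units.drop (units.length / 2)))
termination_by units.length
decreasing_by
  · simp; omega
  · simp; omega

def fully_react_polymer_alt (polymer : String) : Int :=
  ((pvReact polymer.toList).length : Int)

-- ===== PRECONDITION & SPEC =====
def Spec_fully_react_polymer (polymer : String) (out : Int) : Prop := out = fully_react_polymer_alt polymer
instance (polymer : String) (out : Int) : Decidable (Spec_fully_react_polymer polymer out) := by unfold Spec_fully_react_polymer; infer_instance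

-- ===== CLAIM (what is proved, stated in full; the proofs are below) =====
def Claim_equal_fully_react_polymer : Prop := ∀ (polymer : String), Dom_fully_react_polymer polymer → Spec_fully_react_polymer polymer (fully_react_polymer polymer)

-- ===== LEMMAS AND PROOFS =====

lemma pvCharEq_of_toNat {a b : Char} (h : a.toNat = b.toNat) : a = b :=
  Char.ext (UInt32.toNat_inj.mp h)

lemma pvLowerChar_toNat (c : Char) :
    (PySem.Chars.lowerChar c).toNat =
      if 65 ≤ c.toNat ∧ c.toNat ≤ 90 then c.toNat + 32 else c.toNat := by
  unfold PySem.Chars.lowerChar PySem.Chars.isupper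
  have hA : ('A' ≤ c) ↔ (65 ≤ c.toNat) := Iff.rfl
  have hZ : (c ≤ 'Z') ↔ (c.toNat ≤ 90) := Iff.rfl
  split_ifs with h1 h2 h2
  · rw [Char.toNat_ofNat]
    have : (c.toNat + 32).isValidChar := by
      simp only [Bool.and_eq_true, decide_eq_true_eq] at h1
      exact Or.inl (by omega)
    simp [this]
  · exfalso; simp only [Bool.and_eq_true, decide_eq_true_eq, hA, hZ] at h1; omega
  · exfalso; simp only [Bool.and_eq_true, decide_eq_true_eq, hA, hZ] at h1
    exact h1 ⟨h2.1, h2.2⟩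
  · rfl

-- if t reacts with x and x reacts with y then t = y (lower() is the ASCII case swap)
lemma pvReacts_trans_eq {t x y : Char} (h1 : pvReacts t x = true)
    (h2 : pvReacts x y = true) : t = y := by
  unfold pvReacts at h1 h2
  simp only [Bool.and_eq_true, ne_eq, decide_eq_true_eq, beq_iff_eq] at h1 h2
  obtain ⟨htx, hl1⟩ := h1
  obtain ⟨hxy, hl2⟩ := h2
  apply pvCharEq_of_toNat
  have e1 := congrArg Char.toNat hl1
  have e2 := congrArg Char.toNat hl2
  rw [pvLowerChar_toNat, pvLowerChar_toNat] at e1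
  rw [pvLowerChar_toNat, pvLowerChar_toNat] at e2
  have htx' : t.toNat ≠ x.toNat := fun h => htx (pvCharEq_of_toNat h)
  have hxy' : x.toNat ≠ y.toNat := fun h => hxy (pvCharEq_of_toNat h)
  split_ifs at e1 e2 <;> omega

-- a string is reduced when no two adjacent units react; A's stack is always reduced
def pvReduced (l : List Char) : Prop := List.IsChain (fun x y => pvReacts x y = false) l

lemma pvReduced_nil : pvReduced [] := by simp [pvReduced]

lemma pvReduced_short {l : List Char} (h : l.length ≤ 1) : pvReduced l := by
  match l with
  | [] => exact pvReduced_nil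
  | [x] => simp [pvReduced]
  | x :: y :: r => simp at h

lemma pvReduced_append_singleton {s : List Char} {u : Char} (hs : pvReduced s)
    (h : ∀ t, s.getLast? = some t → pvReacts t u = false) : pvReduced (s ++ [u]) := by
  unfold pvReduced at *
  rw [List.isChain_append]
  refine ⟨hs, List.isChain_singleton u, ?_⟩
  intro t ht v hv
  simp at hv; subst hv
  exact h t ht

lemma pvStepA_reduced {s : List Char} (hs : pvReduced s) (u : Char) :
    pvReduced (pvStepA s u) := by
  unfold pvStepA
  match h : s.getLast? with
  | none =>
    have : s = [] := by simpa using h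
    subst this; simp [pvReduced]
  | some t =>
    by_cases hr : pvReacts t u
    · simp only [hr, if_true]; exact hs.dropLast
    · simp only [hr, if_false, Bool.false_eq_true]
      exact pvReduced_append_singleton hs (by
        intro t' ht'; rw [h] at ht'; cases ht'; simpa using hr)

lemma pvFoldl_reduced {s : List Char} (hs : pvReduced s) (l : List Char) :
    pvReduced (l.foldl pvStepA s) := by
  induction l generalizing s with
  | nil => exact hs
  | cons x xs ih => exact ih (pvStepA_reduced hs x)

-- feeding one reacting pair into the machine on a reduced stack is a no-op
lemma pvStepA_cancel {s : List Char} (hs : pvReduced s) {x y : Char}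
    (hxy : pvReacts x y = true) : pvStepA (pvStepA s x) y = s := by
  rcases eq_or_ne s [] with rfl | hne
  · simp [pvStepA, hxy]
  · obtain ⟨s', t, rfl⟩ : ∃ s' t, s = s' ++ [t] :=
      ⟨s.dropLast, s.getLast hne, (List.dropLast_append_getLast hne).symm⟩
    by_cases hr : pvReacts t x
    · -- pop; then t = y is pushed back
      have hty : t = y := pvReacts_trans_eq hr hxy
      have h1 : pvStepA (s' ++ [t]) x = s' := by
        simp [pvStepA, hr]
      rw [h1]
      rcases eq_or_ne s' [] with rfl | hne'
      · simp [pvStepA, hty]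
      · obtain ⟨s'', t', rfl⟩ : ∃ s'' t', s' = s'' ++ [t'] :=
          ⟨s'.dropLast, s'.getLast hne', (List.dropLast_append_getLast hne').symm⟩
        have hb : pvReacts t' t = false := by
          unfold pvReduced at hs
          rw [List.isChain_append] at hs
          exact hs.2.2 t' (by simp) t (by simp)
        have : pvReacts t' y = false := by rwa [hty] at hb
        simp [pvStepA, this, hty]
    · have h1 : pvStepA (s' ++ [t]) x = (s' ++ [t]) ++ [x] := by
        simp [pvStepA, hr]
      rw [h1]
      simp [pvStepA, hxy]

-- cancelling boundary pairs does not change where the machine ends up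
lemma pvMerge_machine_aux : ∀ (n : Nat) (a b st : List Char), a.length ≤ n → pvReduced st →
    (a ++ b).foldl pvStepA st = (pvMerge a b).foldl pvStepA st := by
  intro n
  induction n with
  | zero =>
    intro a b st hlen hst
    have : a = [] := by cases a <;> simp_all
    subst this
    rw [pvMerge.eq_def]; simp
  | succ n ih =>
    intro a b st hlen hst
    match hla : a.getLast? with
    | none =>
      have : a = [] := by simpa using hla
      subst this
      rw [pvMerge.eq_def]; simp
    | some t =>
      have hane : a ≠ [] := by intro h; subst h; simp at hla
      cases b with
      | nil => rw [pvMerge.eq_def, hla]; simp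
      | cons u b' =>
        by_cases hr : pvReacts t u
        · have hmerge : pvMerge a (u :: b') = pvMerge a.dropLast b' := by
            rw [pvMerge.eq_def, hla]; simp [hr]
          have hsplit : a = a.dropLast ++ [t] := by
            have h1 := List.dropLast_append_getLast hane
            have h2 : a.getLast hane = t := by
              rw [List.getLast?_eq_some_getLast hane] at hla
              exact Option.some_inj.mp hla
            rw [h2] at h1; exact h1.symm
          rw [hmerge]
          conv_lhs => rw [hsplit]
          have hS : pvReduced (a.dropLast.foldl pvStepA st) := pvFoldl_reduced hst _
          have hcancel : pvStepA (pvStepA (a.dropLast.foldl pvStepA st) t) u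
              = a.dropLast.foldl pvStepA st := pvStepA_cancel hS hr
          have hlen' : a.dropLast.length ≤ n := by
            have := List.length_pos_of_ne_nil hane
            simp [List.length_dropLast]; omega
          calc ((a.dropLast ++ [t]) ++ u :: b').foldl pvStepA st
              = b'.foldl pvStepA (pvStepA (pvStepA (a.dropLast.foldl pvStepA st) t) u) := by
                simp [List.foldl_append]
            _ = b'.foldl pvStepA (a.dropLast.foldl pvStepA st) := by rw [hcancel]
            _ = (a.dropLast ++ b').foldl pvStepA st := by simp [List.foldl_append]
            _ = (pvMerge a.dropLast b').foldl pvStepA st := ih a.dropLast b' st hlen' hst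
        · rw [pvMerge.eq_def, hla]; simp [hr]

lemma pvMerge_machine {st : List Char} (hst : pvReduced st) (a b : List Char) :
    (a ++ b).foldl pvStepA st = (pvMerge a b).foldl pvStepA st :=
  pvMerge_machine_aux a.length a b st le_rfl hst

lemma pvMerge_reduced_aux : ∀ (n : Nat) (a b : List Char), a.length ≤ n →
    pvReduced a → pvReduced b → pvReduced (pvMerge a b) := by
  intro n
  induction n with
  | zero =>
    intro a b hlen ha hb
    have : a = [] := by cases a <;> simp_all
    subst this
    rw [pvMerge.eq_def]; simpa using hb
  | succ n ih =>
    intro a b hlen ha hb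
    match hla : a.getLast? with
    | none =>
      have : a = [] := by simpa using hla
      subst this
      rw [pvMerge.eq_def]; simpa using hb
    | some t =>
      have hane : a ≠ [] := by intro h; subst h; simp at hla
      cases b with
      | nil => rw [pvMerge.eq_def, hla]; simpa using ha
      | cons u b' =>
        by_cases hr : pvReacts t u
        · rw [pvMerge.eq_def, hla]
          simp only [List.head?_cons, hr, if_true]
          have hlen' : a.dropLast.length ≤ n := by
            have := List.length_pos_of_ne_nil hane
            simp [List.length_dropLast]; omega
          exact ih a.dropLast b' hlen' ha.dropLast hb.tail
        · rw [pvMerge.eq_def, hla]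
          simp only [List.head?_cons, hr, Bool.false_eq_true, if_false]
          unfold pvReduced at *
          rw [List.isChain_append]
          refine ⟨ha, hb, ?_⟩
          intro x hx y hy
          rw [hla] at hx; simp at hx
          simp at hy
          subst hx; subst hy
          simpa using hr

lemma pvReact_reduced_aux : ∀ (n : Nat) (l : List Char), l.length ≤ n →
    pvReduced (pvReact l) := by
  intro n
  induction n with
  | zero =>
    intro l hlen
    rw [pvReact.eq_def]
    simp only [show l.length ≤ 1 from by omega, if_true]
    exact pvReduced_short (by omega)
  | succ n ih =>
    intro l hlen
    rw [pvReact.eq_def]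
    by_cases h1 : l.length ≤ 1
    · simp only [h1, if_true]; exact pvReduced_short h1
    · simp only [h1, if_false]
      have ht : (l.take (l.length / 2)).length ≤ n := by simp; omega
      have hd : (l.drop (l.length / 2)).length ≤ n := by simp; omega
      exact pvMerge_reduced_aux (pvReact (l.take (l.length / 2))).length _ _ le_rfl (ih _ ht) (ih _ hd)

lemma pvReact_machine_aux : ∀ (n : Nat) (l st : List Char), l.length ≤ n → pvReduced st →
    l.foldl pvStepA st = (pvReact l).foldl pvStepA st := by
  intro n
  induction n with
  | zero =>
    intro l st hlen hst
    have : l = [] := by cases l <;> simp_all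
    subst this
    rw [pvReact.eq_def]; simp
  | succ n ih =>
    intro l st hlen hst
    rw [pvReact.eq_def]
    by_cases h1 : l.length ≤ 1
    · simp only [h1, if_true]
    · simp only [h1, if_false]
      have ht : (l.take (l.length / 2)).length ≤ n := by simp; omega
      have hd : (l.drop (l.length / 2)).length ≤ n := by simp; omega
      calc l.foldl pvStepA st
          = (l.take (l.length / 2) ++ l.drop (l.length / 2)).foldl pvStepA st := by
            rw [List.take_append_drop]
        _ = (l.drop (l.length / 2)).foldl pvStepA ((l.take (l.length / 2)).foldl pvStepA st) := by
            rw [List.foldl_append]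
        _ = (l.drop (l.length / 2)).foldl pvStepA ((pvReact (l.take (l.length / 2))).foldl pvStepA st) := by
            rw [ih _ st ht hst]
        _ = (pvReact (l.drop (l.length / 2))).foldl pvStepA ((pvReact (l.take (l.length / 2))).foldl pvStepA st) := by
            rw [ih _ _ hd (pvFoldl_reduced hst _)]
        _ = (pvReact (l.take (l.length / 2)) ++ pvReact (l.drop (l.length / 2))).foldl pvStepA st := by
            rw [List.foldl_append]
        _ = (pvMerge (pvReact (l.take (l.length / 2))) (pvReact (l.drop (l.length / 2)))).foldl pvStepA st :=
            pvMerge_machine hst _ _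

-- the machine just pushes a reduced string whose head does not react with the stack top
lemma pvFoldl_of_reduced (r : List Char) (st : List Char)
    (h : List.IsChain (fun x y => pvReacts x y = false) (st ++ r)) :
    r.foldl pvStepA st = st ++ r := by
  induction r generalizing st with
  | nil => simp
  | cons x xs ih =>
    have hpush : pvStepA st x = st ++ [x] := by
      unfold pvStepA
      match hg : st.getLast? with
      | none => simp
      | some t =>
        have : pvReacts t x = false := by
          rw [List.isChain_append] at h
          exact h.2.2 t (by simp [hg]) x (by simp)
        simp [this]
    have h' : List.IsChain (fun x y => pvReacts x y = false) ((st ++ [x]) ++ xs) := by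
      simpa using h
    simpa [hpush] using ih (st ++ [x]) h'

lemma pvStack_eq_pvReact (l : List Char) : l.foldl pvStepA [] = pvReact l := by
  rw [pvReact_machine_aux l.length l [] le_rfl pvReduced_nil]
  simpa using pvFoldl_of_reduced (pvReact l) []
    (by simpa [pvReduced] using pvReact_reduced_aux l.length l le_rfl)

-- ===== VERDICT (by name: the statement is the Claim_ definition above) =====
theorem fully_react_polymer_spec : Claim_equal_fully_react_polymer := by
  intro polymer _
  unfold Spec_fully_react_polymer fully_react_polymer fully_react_polymer_alt
  rw [pvStack_eq_pvReact]
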